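-- pv_equiv track=rewrite | github.com/02deno/GraphRAG-based-Software-Repository-Quality-Analysis | src/graph/json_document.py | compute_in_out_degrees_by_edge_type
-- ===== SOURCE A (Python) =====
-- from collections import Counter
-- from typing import Any, Dict, List, Tuple
--
-- def compute_in_out_degrees_by_edge_type(
--     edges: List[Dict[str, str]],
-- ) -> Dict[str, Tuple[Counter, Counter]]:
--     """Compute in/out-degree counters grouped by edge ``type``.
--
--     Args:
--         edges: List of edge dicts with ``source``, ``target``, and optional ``type``.
--
--     Returns:
--         Mapping from edge type string to ``(in_degree, out_degree)`` counters.
--     """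
--     degrees_by_type: Dict[str, Tuple[Counter, Counter]] = {}
--     for edge in edges:
--         edge_type = edge.get("type", "UNKNOWN")
--         if edge_type not in degrees_by_type:
--             degrees_by_type[edge_type] = (Counter(), Counter())
--         in_deg, out_deg = degrees_by_type[edge_type]
--         out_deg[edge["source"]] += 1
--         in_deg[edge["target"]] += 1
--     return degrees_by_type
-- ===== SOURCE B (Python) =====
-- from collections import Counter
-- from typing import Any, Dict, List, Tuple
--
--
-- def compute_in_out_degrees_by_edge_type(
--     edges: List[Dict[str, str]],
-- ) -> Dict[str, Tuple[Counter, Counter]]: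
--     """Declarative group-by: list the distinct edge types in first-appearance
--     order, then for each type rescan the edges filtering by that type and
--     count its targets/sources with Counter."""
--     types = list(dict.fromkeys(edge.get("type", "UNKNOWN") for edge in edges))
--     return {
--         t: (
--             Counter(e["target"] for e in edges if e.get("type", "UNKNOWN") == t),
--             Counter(e["source"] for e in edges if e.get("type", "UNKNOWN") == t),
--         )
--         for t in types
--     }
-- ===== Notes on version B (the rewrite author's own statement) =====
-- stated objective: alternative
-- what changed: Replaces A's single incremental pass that mutates per-type counter pairs with a declarative group-by: first compute the distinct edge types in first-appearance order, then for each type rescan the whole edge list filtering by that type and build its (in, out) counters with the Counter constructor; trades a per-type rescan for the incremental dict updates.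
import Mathlib
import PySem

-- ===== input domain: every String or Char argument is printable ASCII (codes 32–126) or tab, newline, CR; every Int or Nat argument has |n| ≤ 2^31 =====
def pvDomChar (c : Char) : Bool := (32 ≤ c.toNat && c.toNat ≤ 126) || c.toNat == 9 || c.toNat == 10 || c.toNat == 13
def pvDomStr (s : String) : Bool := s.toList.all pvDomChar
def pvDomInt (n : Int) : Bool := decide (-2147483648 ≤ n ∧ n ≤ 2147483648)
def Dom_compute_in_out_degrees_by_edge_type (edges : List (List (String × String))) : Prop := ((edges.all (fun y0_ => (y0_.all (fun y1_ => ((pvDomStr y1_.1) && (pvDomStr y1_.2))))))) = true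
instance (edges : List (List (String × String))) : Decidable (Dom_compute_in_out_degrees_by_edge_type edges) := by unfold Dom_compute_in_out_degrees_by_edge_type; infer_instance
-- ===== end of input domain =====

-- B replaces A's incremental per-edge counter-update loop by a declarative group-by: distinct types in
-- first-appearance order, then one filtered rescan of the edges per type; return value proved equal below.

-- ===== PORT A =====
def pvTyp (e : List (String × String)) : String := (PySem.Dict.mk e).getD "type" "UNKNOWN"
def pvSrc (e : List (String × String)) : String := (PySem.Dict.mk e).getD "source" ""
def pvTgt (e : List (String × String)) : String := (PySem.Dict.mk e).getD "target" ""

-- One loop iteration of A: look up the type (default "UNKNOWN"), seed an empty counter pair for a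
-- new type, then bump out_deg[source] and in_deg[target] (the stored tuple is (in_deg, out_deg)).
def pvStepA (d : PySem.Dict String (PySem.Dict String Int × PySem.Dict String Int))
    (edge : List (String × String)) :
    PySem.Dict String (PySem.Dict String Int × PySem.Dict String Int) :=
  let edge_type := pvTyp edge
  let d1 := if d.contains edge_type then d else d.insert edge_type (PySem.Dict.empty, PySem.Dict.empty)
  let p := d1.getD edge_type (PySem.Dict.empty, PySem.Dict.empty)
  d1.insert edge_type (p.1.modify (pvTgt edge) 0 (· + 1), p.2.modify (pvSrc edge) 0 (· + 1))

def compute_in_out_degrees_by_edge_type (edges : List (List (String × String))) : List (String × (List (String × Int)) × (List (String × Int))) :=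
  (edges.foldl pvStepA PySem.Dict.empty).items.map (fun p => (p.1, p.2.1.items, p.2.2.items))

-- ===== PORT B =====
-- B: distinct types in first-appearance order (dict.fromkeys = PySem.List.dedup), then per type a
-- filtered rescan counted with the Counter constructor.
def compute_in_out_degrees_by_edge_type_alt (edges : List (List (String × String))) : List (String × (List (String × Int)) × (List (String × Int))) :=
  (PySem.List.dedup (edges.map pvTyp)).map (fun t =>
    (t,
     (PySem.Dict.counter ((edges.filter (fun e => pvTyp e == t)).map pvTgt)).items,
     (PySem.Dict.counter ((edges.filter (fun e => pvTyp e == t)).map pvSrc)).items))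

-- ===== PRECONDITION & SPEC =====
-- Pre_ excludes exactly the edges missing a "source" or "target" key, on which Python A raises KeyError.
def Pre_compute_in_out_degrees_by_edge_type (edges : List (List (String × String))) : Prop :=
  (edges.all (fun e => e.any (fun p => p.1 == "source") && e.any (fun p => p.1 == "target"))) = true
instance (edges : List (List (String × String))) : Decidable (Pre_compute_in_out_degrees_by_edge_type edges) := by unfold Pre_compute_in_out_degrees_by_edge_type; infer_instance

def pvWitness_compute_in_out_degrees_by_edge_type : (List (List (String × String))) :=
  [[("source", "a"), ("target", "b"), ("type", "calls")], [("source", "b"), ("target", "a")]]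

def Spec_compute_in_out_degrees_by_edge_type (edges : List (List (String × String))) (out : List (String × (List (String × Int)) × (List (String × Int)))) : Prop := out = compute_in_out_degrees_by_edge_type_alt edges
instance (edges : List (List (String × String))) (out : List (String × (List (String × Int)) × (List (String × Int)))) : Decidable (Spec_compute_in_out_degrees_by_edge_type edges out) := by unfold Spec_compute_in_out_degrees_by_edge_type; infer_instance

-- ===== CLAIM =====
def Claim_equal_compute_in_out_degrees_by_edge_type : Prop := ∀ (edges : List (List (String × String))), Dom_compute_in_out_degrees_by_edge_type edges → Pre_compute_in_out_degrees_by_edge_type edges → Spec_compute_in_out_degrees_by_edge_type edges (compute_in_out_degrees_by_edge_type edges)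

-- ===== LEMMAS AND PROOFS =====

-- Keys of A's fold state: each edge Set.add's its type to the key list.
theorem pvKeys_stepA (d : PySem.Dict String (PySem.Dict String Int × PySem.Dict String Int))
    (e : List (String × String)) :
    (pvStepA d e).keys = PySem.Set.add d.keys (pvTyp e) := by
  simp only [pvStepA]
  by_cases h : d.contains (pvTyp e) = true
  · rw [if_pos h, PySem.Dict.keys_insert_of_contains _ _ h, PySem.Set.add,
      if_pos ((PySem.Set.contains_iff _ _).mpr ((PySem.Dict.contains_iff_mem_keys d (pvTyp e)).mp h))]
  · rw [if_neg h, PySem.Dict.keys_insert_of_contains _ _ (PySem.Dict.contains_insert_self d _ _),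
      PySem.Dict.keys_insert_of_not_contains _ _ (by simpa using h), PySem.Set.add,
      if_neg (fun hc => h ((PySem.Dict.contains_iff_mem_keys d (pvTyp e)).mpr
        ((PySem.Set.contains_iff _ _).mp hc)))]

theorem pvKeys_foldA (edges : List (List (String × String)))
    (d : PySem.Dict String (PySem.Dict String Int × PySem.Dict String Int)) :
    (edges.foldl pvStepA d).keys = (edges.map pvTyp).foldl PySem.Set.add d.keys := by
  induction edges generalizing d with
  | nil => rfl
  | cons e es ih => simp only [List.foldl_cons, List.map_cons, ih, pvKeys_stepA]

theorem pvNodup_foldA (edges : List (List (String × String)))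
    (d : PySem.Dict String (PySem.Dict String Int × PySem.Dict String Int))
    (h : d.keys.Nodup) : (edges.foldl pvStepA d).keys.Nodup := by
  induction edges generalizing d with
  | nil => exact h
  | cons e es ih =>
      refine ih _ ?_
      simp only [pvStepA]
      split
      · exact PySem.Dict.nodup_keys_insert _ _ _ h
      · exact PySem.Dict.nodup_keys_insert _ _ _ (PySem.Dict.nodup_keys_insert _ _ _ h)

-- Values of A's fold state at key t: the counter-update fold over the edges of type t.
theorem pvGetD_foldA (edges : List (List (String × String)))
    (d : PySem.Dict String (PySem.Dict String Int × PySem.Dict String Int)) (t : String) :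
    (edges.foldl pvStepA d).getD t (PySem.Dict.empty, PySem.Dict.empty) =
      (((edges.filter (fun e => pvTyp e == t)).map pvTgt).foldl
          (fun c x => c.modify x 0 (· + 1)) (d.getD t (PySem.Dict.empty, PySem.Dict.empty)).1,
       ((edges.filter (fun e => pvTyp e == t)).map pvSrc).foldl
          (fun c x => c.modify x 0 (· + 1)) (d.getD t (PySem.Dict.empty, PySem.Dict.empty)).2) := by
  induction edges generalizing d with
  | nil => rfl
  | cons e es ih =>
      simp only [List.foldl_cons, List.filter_cons]
      by_cases he : pvTyp e = t
      · rw [if_pos (by simpa using he), List.map_cons, List.map_cons, List.foldl_cons,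
          List.foldl_cons, ih]
        have hstep : (pvStepA d e).getD t (PySem.Dict.empty, PySem.Dict.empty) =
            ((d.getD t (PySem.Dict.empty, PySem.Dict.empty)).1.modify (pvTgt e) 0 (· + 1),
             (d.getD t (PySem.Dict.empty, PySem.Dict.empty)).2.modify (pvSrc e) 0 (· + 1)) := by
          simp only [pvStepA, he]
          by_cases h : d.contains t = true
          · rw [if_pos h, PySem.Dict.getD_insert_self]
          · rw [if_neg h, PySem.Dict.getD_insert_self, PySem.Dict.getD_insert_self,
              PySem.Dict.getD_of_not_contains _ _ (by simpa using h)]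
        rw [hstep]
      · rw [if_neg (by simpa using he)]
        rw [ih]
        have hstep : (pvStepA d e).getD t (PySem.Dict.empty, PySem.Dict.empty) =
            d.getD t (PySem.Dict.empty, PySem.Dict.empty) := by
          simp only [pvStepA]
          by_cases h : d.contains (pvTyp e) = true
          · rw [if_pos h, PySem.Dict.getD_insert_of_ne _ _ _ (Ne.symm he)]
          · rw [if_neg h, PySem.Dict.getD_insert_of_ne _ _ _ (Ne.symm he),
              PySem.Dict.getD_insert_of_ne _ _ _ (Ne.symm he)]
        rw [hstep]

-- ===== VERDICT =====
theorem compute_in_out_degrees_by_edge_type_spec : Claim_equal_compute_in_out_degrees_by_edge_type := by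
  intro edges _ _
  unfold Spec_compute_in_out_degrees_by_edge_type
  unfold compute_in_out_degrees_by_edge_type compute_in_out_degrees_by_edge_type_alt
  rw [PySem.Dict.items_eq_map_keys _ (pvNodup_foldA edges _ PySem.Dict.nodup_keys_empty)
        (PySem.Dict.empty, PySem.Dict.empty)]
  rw [pvKeys_foldA]
  have hkeys : (edges.map pvTyp).foldl PySem.Set.add
        (PySem.Dict.keys (PySem.Dict.empty : PySem.Dict String (PySem.Dict String Int × PySem.Dict String Int)))
      = PySem.List.dedup (edges.map pvTyp) := by
    rw [PySem.List.dedup_eq_ofList, PySem.Set.ofList_eq_foldl]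
    rfl
  rw [hkeys, List.map_map]
  apply List.map_congr_left
  intro t _
  simp only [Function.comp_apply, pvGetD_foldA, PySem.Dict.counter_eq_foldl,
    PySem.Dict.getD_empty]
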